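-- pv_equiv track=rewrite | github.com/OpesMentis/AdventOfCode_2020 | day17/day17.py | next_cubes
-- ===== SOURCE A (Python) =====
-- import itertools as it
--
-- def active_neighbours_1(cubes, pos):
--     x0, y0, z0 = pos
--     prox = []
--     s = 0
--     for dx, dy, dz in it.product([-1,0,1], repeat=3):
--         if dx == dy == dz == 0:
--             continue
--         x, y, z = x0+dx, y0+dy, z0+dz
--         if (x, y, z) in cubes:
--             s += cubes[(x, y, z)] == True
--         else:
--             prox.append((x, y, z))
--
--     return s, prox
--
-- def active_neighbours_2(cubes, pos):
--     x0, y0, z0, w0 = pos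
--     prox = []
--     s = 0
--     for dx, dy, dz, dw in it.product([-1,0,1], repeat=4):
--         if dx == dy == dz == dw == 0:
--             continue
--         x, y, z, w = x0+dx, y0+dy, z0+dz, w0+dw
--         if (x, y, z, w) in cubes:
--             s += cubes[(x, y, z, w)] == True
--         else:
--             prox.append((x, y, z, w))
--
--     return s, prox
--
-- def next_cubes(cubes, part2=False):
--     cp_cubes = cubes.copy()
--     for c in cubes:
--         if not part2:
--             n, prox = active_neighbours_1(cubes, c)
--         else:
--             n, prox = active_neighbours_2(cubes, c)
--         if cubes[c] and n not in [2, 3]: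
--             cp_cubes[c] = False
--         elif not cubes[c] and n == 3:
--             cp_cubes[c] = True
--
--         for x in prox:
--             if x not in cp_cubes:
--                 cp_cubes[x] = False
--
--     return cp_cubes
-- ===== SOURCE B (Python) =====
-- import itertools as it
--
-- def next_cubes(cubes, part2=False):
--     dim = 4 if part2 else 3
--     offs = [d for d in it.product((-1, 0, 1), repeat=dim) if any(d)]
--     # scatter pass: each active cell contributes +1 to every neighbour's counter
--     counter = {}
--     for c, v in cubes.items():
--         if v:
--             for d in offs:
--                 x = tuple(a + b for a, b in zip(c, d, strict=True))
--                 counter[x] = counter.get(x, 0) + 1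
--     # rule pass over the original cells, using the gathered counts
--     out = {c: (counter.get(c, 0) in (2, 3)) if v else counter.get(c, 0) == 3
--            for c, v in cubes.items()}
--     # frontier pass: track every yet-unseen neighbour of a tracked cell as inactive
--     for c in cubes:
--         for d in offs:
--             x = tuple(a + b for a, b in zip(c, d, strict=True))
--             if x not in cubes and x not in out:
--                 out[x] = False
--     return out
-- ===== Notes on version B (the rewrite author's own statement) =====
-- stated objective: alternative
-- what changed: A probes the dict 26/80 times per tracked cell to count active neighbours and interleaves rule updates with frontier insertion into one mutating copy; B instead scatters: it builds a counter of contributions from the ACTIVE cells only, then applies the rule in a separate pass over the original keys via counter.get, and grows the frontier in a third independent pass.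
import Mathlib
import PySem

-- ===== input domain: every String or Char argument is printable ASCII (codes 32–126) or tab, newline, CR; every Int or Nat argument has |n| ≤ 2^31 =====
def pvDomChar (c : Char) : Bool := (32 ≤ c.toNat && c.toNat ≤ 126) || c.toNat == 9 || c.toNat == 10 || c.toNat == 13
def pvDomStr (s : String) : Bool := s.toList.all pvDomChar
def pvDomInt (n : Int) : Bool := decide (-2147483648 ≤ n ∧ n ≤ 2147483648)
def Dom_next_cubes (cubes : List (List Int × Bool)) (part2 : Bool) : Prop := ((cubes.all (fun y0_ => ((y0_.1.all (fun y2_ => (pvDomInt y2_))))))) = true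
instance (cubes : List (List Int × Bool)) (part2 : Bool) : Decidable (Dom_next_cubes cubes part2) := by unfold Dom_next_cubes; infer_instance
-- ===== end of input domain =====

-- B replaces A's per-cell neighbour scan (26/80 dict probes per tracked cell, building a prox list
-- interleaved with the copy's mutation) by a scatter pass: one counter built from the ACTIVE cells
-- only, then a rule pass over the original keys, then a separate frontier pass (objective: alternative).

-- ===== PORT A =====
-- it.product([-1,0,1], repeat=3) in itertools order (last coordinate varies fastest)
def offsets3 : List (List Int) :=
  ([-1, 0, 1] : List Int).flatMap fun dx =>
    ([-1, 0, 1] : List Int).flatMap fun dy =>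
      ([-1, 0, 1] : List Int).map fun dz => [dx, dy, dz]

def offsets4 : List (List Int) :=
  ([-1, 0, 1] : List Int).flatMap fun dx =>
    ([-1, 0, 1] : List Int).flatMap fun dy =>
      ([-1, 0, 1] : List Int).flatMap fun dz =>
        ([-1, 0, 1] : List Int).map fun dw => [dx, dy, dz, dw]

def active_neighbours_1 (cubes : PySem.Dict (List Int) Bool) (pos : List Int) :
    Int × List (List Int) :=
  match pos with
  | [x0, y0, z0] =>
    offsets3.foldl (init := ((0 : Int), ([] : List (List Int)))) fun sp d =>
      match d with
      | [dx, dy, dz] =>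
        if dx = 0 ∧ dy = 0 ∧ dz = 0 then sp
        else
          let p := [x0 + dx, y0 + dy, z0 + dz]
          if cubes.contains p then (sp.1 + (if cubes.getD p false then 1 else 0), sp.2)
          else (sp.1, sp.2 ++ [p])
      | _ => sp
  | _ => (0, [])  -- len(pos) ≠ 3: Python raises ValueError on unpacking; excluded by Pre_

def active_neighbours_2 (cubes : PySem.Dict (List Int) Bool) (pos : List Int) :
    Int × List (List Int) :=
  match pos with
  | [x0, y0, z0, w0] =>
    offsets4.foldl (init := ((0 : Int), ([] : List (List Int)))) fun sp d =>
      match d with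
      | [dx, dy, dz, dw] =>
        if dx = 0 ∧ dy = 0 ∧ dz = 0 ∧ dw = 0 then sp
        else
          let p := [x0 + dx, y0 + dy, z0 + dz, w0 + dw]
          if cubes.contains p then (sp.1 + (if cubes.getD p false then 1 else 0), sp.2)
          else (sp.1, sp.2 ++ [p])
      | _ => sp
  | _ => (0, [])  -- len(pos) ≠ 4: Python raises ValueError on unpacking; excluded by Pre_

def next_cubes (cubes : List (List Int × Bool)) (part2 : Bool) : List (List Int × Bool) :=
  let d := PySem.Dict.mk cubes
  let cp0 := PySem.Dict.mk cubes          -- cp_cubes = cubes.copy()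
  let final := d.keys.foldl (init := cp0) fun cp c =>
    let np := if !part2 then active_neighbours_1 d c else active_neighbours_2 d c
    let cp1 :=
      if d.getD c false ∧ ¬(np.1 = 2 ∨ np.1 = 3) then cp.insert c false
      else if ¬(d.getD c false = true) ∧ np.1 = 3 then cp.insert c true
      else cp
    np.2.foldl (init := cp1) fun cp x =>
      if cp.contains x then cp else cp.insert x false
  final.items

-- ===== PORT B =====
-- list(it.product((-1,0,1), repeat=n)) as lists
def pyProductRepeat (l : List Int) : Nat → List (List Int)
  | 0 => [[]]
  | n + 1 => l.flatMap fun x => (pyProductRepeat l n).map (x :: ·)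

def next_cubes_alt (cubes : List (List Int × Bool)) (part2 : Bool) : List (List Int × Bool) :=
  let dim : Nat := if part2 then 4 else 3
  let offs := (pyProductRepeat [-1, 0, 1] dim).filter fun d => d.any fun a => !(a == 0)
  let dcubes := PySem.Dict.mk cubes
  -- scatter pass: counter of active-neighbour contributions
  let counter : PySem.Dict (List Int) Int :=
    cubes.foldl (init := PySem.Dict.empty) fun ctr cv =>
      if cv.2 then
        offs.foldl (init := ctr) fun ctr d =>
          let x := List.zipWith (· + ·) cv.1 d
          ctr.insert x (ctr.getD x 0 + 1)
      else ctr
  -- rule pass over the original cells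
  let out0 : PySem.Dict (List Int) Bool :=
    PySem.Dict.mk <| cubes.map fun cv =>
      (cv.1, if cv.2 then (counter.getD cv.1 0 = 2 ∨ counter.getD cv.1 0 = 3)
             else counter.getD cv.1 0 = 3)
  -- frontier pass
  let final := cubes.foldl (init := out0) fun out cv =>
    offs.foldl (init := out) fun out d =>
      let x := List.zipWith (· + ·) cv.1 d
      if dcubes.contains x then out
      else if out.contains x then out
      else out.insert x false
  final.items

-- ===== PRECONDITION & SPEC =====
-- Pre_ excludes (a) association lists with duplicate keys, which no Python dict input corresponds
-- to, and (b) keys whose length is not 3 (resp. 4 with part2), on which Python A raises ValueError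
-- when unpacking the coordinate tuple.
def Pre_next_cubes (cubes : List (List Int × Bool)) (part2 : Bool) : Prop :=
  (cubes.map Prod.fst).Nodup ∧ ∀ p ∈ cubes, p.1.length = if part2 then 4 else 3
instance (cubes : List (List Int × Bool)) (part2 : Bool) : Decidable (Pre_next_cubes cubes part2) := by
  unfold Pre_next_cubes; infer_instance

def pvWitness_next_cubes : (List (List Int × Bool)) × Bool :=
  ([([0, 0, 0], true), ([0, 0, 1], true), ([1, 0, 1], false)], false)

def Spec_next_cubes (cubes : List (List Int × Bool)) (part2 : Bool) (out : List (List Int × Bool)) : Prop := out = next_cubes_alt cubes part2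
instance (cubes : List (List Int × Bool)) (part2 : Bool) (out : List (List Int × Bool)) : Decidable (Spec_next_cubes cubes part2 out) := by unfold Spec_next_cubes; infer_instance

-- ===== CLAIM (what is proved, stated in full; the proofs are below) =====
def Claim_equal_next_cubes : Prop := ∀ (cubes : List (List Int × Bool)) (part2 : Bool), Dom_next_cubes cubes part2 → Pre_next_cubes cubes part2 → Spec_next_cubes cubes part2 (next_cubes cubes part2)

-- ===== LEMMAS AND PROOFS =====

-- componentwise vector arithmetic on coordinate lists
def addL (c d : List Int) : List Int := List.zipWith (· + ·) c d
def subL (x c : List Int) : List Int := List.zipWith (· - ·) x c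

-- A's neighbour count, as a countP over the nonzero offsets
def nInt (offs : List (List Int)) (dc : PySem.Dict (List Int) Bool) (c : List Int) : Int :=
  ((offs.countP fun d => dc.get? (addL c d) == some true : Nat) : Int)

-- the value the rule assigns to a tracked cell
def newVal (offs : List (List Int)) (dc : PySem.Dict (List Int) Bool) (cv : List Int × Bool) : Bool :=
  if cv.2 then decide (nInt offs dc cv.1 = 2 ∨ nInt offs dc cv.1 = 3)
  else decide (nInt offs dc cv.1 = 3)

def mapped (offs : List (List Int)) (dc : PySem.Dict (List Int) Bool)
    (l : List (List Int × Bool)) : List (List Int × Bool) :=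
  l.map fun cv => (cv.1, newVal offs dc cv)

-- one cell's contribution to the frontier list
def fstep (offs : List (List Int)) (dc : PySem.Dict (List Int) Bool)
    (F : List (List Int × Bool)) (c : List Int) : List (List Int × Bool) :=
  offs.foldl (init := F) fun F d =>
    if dc.contains (addL c d) || (PySem.Dict.mk F).contains (addL c d) then F
    else F ++ [(addL c d, false)]

def counterOf (offs : List (List Int)) (cubes : List (List Int × Bool)) :
    PySem.Dict (List Int) Int :=
  cubes.foldl (fun ctr cv =>
    if cv.2 then
      offs.foldl (fun ctr d =>
        ctr.insert (addL cv.1 d) (ctr.getD (addL cv.1 d) 0 + 1)) ctr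
    else ctr) PySem.Dict.empty

def front (offs : List (List Int)) (dc : PySem.Dict (List Int) Bool)
    (l : List (List Int × Bool)) (F : List (List Int × Bool)) : List (List Int × Bool) :=
  l.foldl (fun F cv => fstep offs dc F cv.1) F


-- remaining proof-side helpers

def proxOf (offs : List (List Int)) (dc : PySem.Dict (List Int) Bool) (c : List Int) :
    List (List Int) :=
  (offs.map (addL c)).filter fun x => !dc.contains x

-- the step of A's neighbour scan, on a single nonzero offset
def stepA (dc : PySem.Dict (List Int) Bool) (c : List Int)
    (sp : Int × List (List Int)) (d : List Int) : Int × List (List Int) :=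
  if dc.contains (addL c d) then
    (sp.1 + (if dc.getD (addL c d) false then 1 else 0), sp.2)
  else (sp.1, sp.2 ++ [addL c d])

-- A's per-fresh-cell frontier step, and A's whole per-cell loop body
def gstep (F : List (List Int × Bool)) (x : List Int) : List (List Int × Bool) :=
  if (PySem.Dict.mk F).contains x then F else F ++ [(x, false)]

def stepMain (dc : PySem.Dict (List Int) Bool)
    (an : List Int → Int × List (List Int))
    (cp : PySem.Dict (List Int) Bool) (c : List Int) : PySem.Dict (List Int) Bool :=
  let np := an c
  let cp1 :=
    if dc.getD c false ∧ ¬(np.1 = 2 ∨ np.1 = 3) then cp.insert c false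
    else if ¬(dc.getD c false = true) ∧ np.1 = 3 then cp.insert c true
    else cp
  np.2.foldl (init := cp1) fun cp x =>
    if cp.contains x then cp else cp.insert x false

def offsB (dim : Nat) : List (List Int) :=
  (pyProductRepeat [-1, 0, 1] dim).filter fun d => d.any fun a => !(a == 0)

-- ---------- generic list / arithmetic lemmas ----------

theorem countP_congrB {α : Type} (l : List α) (p q : α → Bool)
    (h : ∀ a ∈ l, p a = q a) : l.countP p = l.countP q :=
  List.countP_congr (fun a ha => by rw [h a ha])

theorem countP_or_disj {α : Type} (l : List α) (p q : α → Bool)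
    (h : ∀ x ∈ l, ¬(p x = true ∧ q x = true)) :
    l.countP (fun x => p x || q x) = l.countP p + l.countP q := by
  induction l with
  | nil => simp
  | cons a t ih =>
    have ha := h a (by simp)
    have iht := ih (fun x hx => h x (by simp [hx]))
    simp only [List.countP_cons, iht]
    by_cases hp : p a = true <;> by_cases hq : q a = true <;>
      simp [hp, hq] at ha ⊢ <;> omega

theorem count_nodup {α : Type} [BEq α] [LawfulBEq α] (l : List α) (e : α) (h : l.Nodup) :
    l.count e = if e ∈ l then 1 else 0 := by
  by_cases hm : e ∈ l
  · rw [if_pos hm]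
    exact List.count_eq_one_of_mem h hm
  · rw [if_neg hm]
    exact List.count_eq_zero_of_not_mem hm

theorem addL_eq_iff (c d x : List Int) (h : c.length = d.length) :
    addL c d = x ↔ x.length = c.length ∧ d = subL x c := by
  induction c generalizing d x with
  | nil =>
    cases d with
    | nil => cases x <;> simp [addL, subL]
    | cons dh dt => simp at h
  | cons ch ct ih =>
    cases d with
    | nil => simp at h
    | cons dh dt =>
      cases x with
      | nil => simp [addL, subL]
      | cons xh xt =>
        have ih' := ih dt xt (by simpa using h)
        simp only [addL, subL, List.zipWith_cons_cons, List.cons.injEq,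
          List.length_cons] at ih' ⊢
        constructor
        · rintro ⟨h1, h2⟩
          rcases ih'.mp h2 with ⟨hl, hd⟩
          exact ⟨by omega, by omega, hd⟩
        · rintro ⟨hl, hd, hdt⟩
          exact ⟨by omega, ih'.mpr ⟨by omega, hdt⟩⟩

theorem subL_anti (x c : List Int) (h : x.length = c.length) :
    subL c x = (subL x c).map (fun a => -a) := by
  induction x generalizing c with
  | nil => cases c <;> simp_all [subL]
  | cons xh xt ih =>
    cases c with
    | nil => simp at h
    | cons chh ct =>
      simp only [subL, List.zipWith_cons_cons, List.map_cons, List.cons.injEq]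
      refine ⟨by ring, ?_⟩
      simpa [subL] using ih ct (by simpa using h)

theorem length_eq_three (c : List Int) (h : c.length = 3) :
    ∃ x y z : Int, c = [x, y, z] := by
  rcases c with _ | ⟨x, _ | ⟨y, _ | ⟨z, _ | ⟨w, t⟩⟩⟩⟩ <;> simp_all


theorem length_eq_four (c : List Int) (h : c.length = 4) :
    ∃ x y z w : Int, c = [x, y, z, w] := by
  rcases c with _ | ⟨x, _ | ⟨y, _ | ⟨z, _ | ⟨w, _ | ⟨u, t⟩⟩⟩⟩⟩ <;> simp_all


-- ---------- offset-list facts (decidable) ----------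

theorem offsB3_nodup : (offsB 3).Nodup := by decide
theorem offsB4_nodup : (offsB 4).Nodup := by decide
theorem offsB3_len : ∀ d ∈ offsB 3, d.length = 3 := by decide
theorem offsB4_len : ∀ d ∈ offsB 4, d.length = 4 := by decide
theorem offsB3_neg : ∀ e ∈ offsB 3, e.map (fun a => -a) ∈ offsB 3 := by decide
theorem offsB4_neg : ∀ e ∈ offsB 4, e.map (fun a => -a) ∈ offsB 4 := by decide

theorem subL_mem_swap (offs : List (List Int)) (dim : Nat)
    (hneg : ∀ e ∈ offs, e.map (fun a => -a) ∈ offs)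
    (a c : List Int) (ha : a.length = dim) (hc : c.length = dim) :
    subL a c ∈ offs ↔ subL c a ∈ offs := by
  constructor <;> intro hm
  · have h2 := hneg _ hm
    rwa [← subL_anti a c (ha.trans hc.symm)] at h2
  · have h2 := hneg _ hm
    rwa [← subL_anti c a (hc.trans ha.symm)] at h2

-- ---------- A's helpers: closed form ----------

theorem foldA_closed (offs : List (List Int)) (dc : PySem.Dict (List Int) Bool)
    (c : List Int) (s : Int) (P : List (List Int)) :
    offs.foldl (stepA dc c) (s, P) =
      (s + nInt offs dc c, P ++ proxOf offs dc c) := by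
  induction offs generalizing s P with
  | nil => simp [nInt, proxOf]
  | cons d t ih =>
    simp only [List.foldl_cons]
    cases hg : dc.get? (addL c d) with
    | none =>
      have hcont : dc.contains (addL c d) = false := by
        rw [PySem.Dict.contains_eq_isSome_get?, hg]; rfl
      have hstep : stepA dc c (s, P) d = (s, P ++ [addL c d]) := by
        simp [stepA, hcont]
      rw [hstep, ih]
      simp [nInt, proxOf, hg, hcont]
    | some b =>
      have hcont : dc.contains (addL c d) = true := by
        rw [PySem.Dict.contains_eq_isSome_get?, hg]; rfl
      have hgd : dc.getD (addL c d) false = b := by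
        rw [PySem.Dict.getD_eq_get?_getD, hg]; rfl
      have hstep : stepA dc c (s, P) d = (s + (if b then 1 else 0), P) := by
        simp [stepA, hcont, hgd]
      rw [hstep, ih]
      cases b <;>
        simp [nInt, proxOf, hg, hcont] <;> push_cast <;> ring

theorem an1_closed (dc : PySem.Dict (List Int) Bool) (x y z : Int) :
    active_neighbours_1 dc [x, y, z] =
      (nInt (offsB 3) dc [x, y, z], proxOf (offsB 3) dc [x, y, z]) := by
  simp only [active_neighbours_1]
  refine Eq.trans (PySem.List.foldl_congr_mem' _ _
    (fun sp d => if ¬ d = [0, 0, 0] then stepA dc [x, y, z] sp d else sp) _ ?_) ?_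
  · intro d hd sp
    simp only [offsets3, List.mem_flatMap, List.mem_map] at hd
    obtain ⟨dx, -, dy, -, dz, -, rfl⟩ := hd
    by_cases h0 : dx = 0 ∧ dy = 0 ∧ dz = 0
    · obtain ⟨rfl, rfl, rfl⟩ := h0
      simp
    · have h0' : ¬([dx, dy, dz] = ([0, 0, 0] : List Int)) := by simpa using h0
      simp only []
      rw [if_pos h0']
      simp [stepA, addL, h0]
  · rw [PySem.List.foldl_ite_eq_foldl_filter]
    rw [show offsets3.filter (fun d => decide (¬ d = [0, 0, 0])) = offsB 3 from by decide]
    rw [foldA_closed]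
    simp

theorem an2_closed (dc : PySem.Dict (List Int) Bool) (x y z w : Int) :
    active_neighbours_2 dc [x, y, z, w] =
      (nInt (offsB 4) dc [x, y, z, w], proxOf (offsB 4) dc [x, y, z, w]) := by
  simp only [active_neighbours_2]
  refine Eq.trans (PySem.List.foldl_congr_mem' _ _
    (fun sp d => if ¬ d = [0, 0, 0, 0] then stepA dc [x, y, z, w] sp d else sp) _ ?_) ?_
  · intro d hd sp
    simp only [offsets4, List.mem_flatMap, List.mem_map] at hd
    obtain ⟨dx, -, dy, -, dz, -, dw, -, rfl⟩ := hd
    by_cases h0 : dx = 0 ∧ dy = 0 ∧ dz = 0 ∧ dw = 0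
    · obtain ⟨rfl, rfl, rfl, rfl⟩ := h0
      simp
    · have h0' : ¬([dx, dy, dz, dw] = ([0, 0, 0, 0] : List Int)) := by simpa using h0
      simp only []
      rw [if_pos h0']
      simp [stepA, addL, h0]
  · rw [PySem.List.foldl_ite_eq_foldl_filter]
    rw [show offsets4.filter (fun d => decide (¬ d = [0, 0, 0, 0])) = offsB 4 from by decide]
    rw [foldA_closed]
    simp

-- ---------- counter correctness ----------

theorem counter_getD (offs : List (List Int)) (cubes : List (List Int × Bool))
    (ctr0 : PySem.Dict (List Int) Int) (x : List Int) :
    (cubes.foldl (fun ctr cv =>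
        if cv.2 then
          offs.foldl (fun ctr d =>
            ctr.insert (addL cv.1 d) (ctr.getD (addL cv.1 d) 0 + 1)) ctr
        else ctr) ctr0).getD x 0
      = ctr0.getD x 0 +
        ((cubes.map fun cv =>
            if cv.2 then (((offs.map (addL cv.1)).count x : Nat) : Int) else 0).sum) := by
  induction cubes generalizing ctr0 with
  | nil => simp
  | cons cv t ih =>
    simp only [List.foldl_cons, List.map_cons, List.sum_cons]
    by_cases hv : cv.2 = true
    · have hmap := List.foldl_map (f := addL cv.1)
        (g := fun (ctr : PySem.Dict (List Int) Int) y => ctr.insert y (ctr.getD y 0 + 1))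
        (l := offs) (init := ctr0)
      rw [if_pos hv, if_pos hv, ih, ← hmap, PySem.Dict.getD_foldl_insert_add_one]
      ring
    · rw [if_neg hv, if_neg hv, ih]
      ring

theorem count_map_addL (offs : List (List Int)) (dim : Nat) (c x : List Int)
    (hnd : offs.Nodup) (hlen : ∀ d ∈ offs, d.length = dim) (hc : c.length = dim) :
    (offs.map (addL c)).count x =
      if x.length = dim ∧ subL x c ∈ offs then 1 else 0 := by
  rw [List.count_eq_countP, List.countP_map]
  have hcongr : ∀ d ∈ offs,
      ((fun y => y == x) ∘ addL c) d = decide (x.length = dim ∧ d = subL x c) := by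
    intro d hd
    have hiff := addL_eq_iff c d x (hc.trans (hlen d hd).symm)
    rw [hc] at hiff
    have hb : ((fun y => y == x) ∘ addL c) d = decide (addL c d = x) := by
      by_cases h : addL c d = x <;> simp [h]
    rw [hb]
    exact decide_eq_decide.mpr hiff
  rw [countP_congrB _ _ _ hcongr]
  by_cases hx : x.length = dim
  · have heq : (fun d => decide (x.length = dim ∧ d = subL x c))
        = fun d => d == subL x c := by
      funext d
      by_cases h : d = subL x c <;> simp [h, hx]
    rw [heq, ← List.count_eq_countP, count_nodup _ _ hnd]
    simp [hx]
  · have heq : ∀ d ∈ offs, (decide (x.length = dim ∧ d = subL x c)) = false := by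
      intro d _
      simp [hx]
    rw [countP_congrB _ _ _ heq]
    simp [hx]

theorem dc_bridge (cubes : List (List Int × Bool)) (offs : List (List Int)) (dim : Nat)
    (hk : (cubes.map Prod.fst).Nodup) (hkl : ∀ p ∈ cubes, p.1.length = dim)
    (hnd : offs.Nodup) (hol : ∀ d ∈ offs, d.length = dim)
    (hneg : ∀ e ∈ offs, e.map (fun a => -a) ∈ offs)
    (c : List Int) (hc : c.length = dim) :
    offs.countP (fun d => (PySem.Dict.mk cubes).get? (addL c d) == some true)
      = cubes.countP (fun cv => cv.2 && decide (subL c cv.1 ∈ offs)) := by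
  have hpred : ∀ d ∈ offs,
      ((PySem.Dict.mk cubes).get? (addL c d) == some true)
        = decide ((addL c d, true) ∈ cubes) := by
    intro d _
    have hiff := PySem.Dict.get?_eq_some_iff_mem_items (PySem.Dict.mk cubes)
      (addL c d) true hk
    rw [show ((PySem.Dict.mk cubes).get? (addL c d) == some true)
        = decide ((PySem.Dict.mk cubes).get? (addL c d) = some true) from by
      cases h : (PySem.Dict.mk cubes).get? (addL c d) <;> simp [h]]
    exact decide_eq_decide.mpr hiff
  rw [countP_congrB _ _ _ hpred]
  clear hpred
  revert hk hkl
  induction cubes with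
  | nil => intro _ _; simp
  | cons cv rest ih =>
    intro hk hkl
    obtain ⟨hnotin, hkrest⟩ : cv.1 ∉ rest.map Prod.fst ∧ (rest.map Prod.fst).Nodup := by
      simpa using hk
    have hcv1 : cv.1.length = dim := hkl cv (by simp)
    have hsplitp : ∀ d ∈ offs,
        (decide ((addL c d, true) ∈ cv :: rest))
          = ((decide ((addL c d, true) = cv)) || decide ((addL c d, true) ∈ rest)) := by
      intro d _
      simp [List.mem_cons]
    have hdisj : ∀ d ∈ offs,
        ¬((decide ((addL c d, true) = cv)) = true ∧ (decide ((addL c d, true) ∈ rest)) = true) := by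
      intro d _ ⟨h1, h2⟩
      rw [decide_eq_true_iff] at h1 h2
      exact hnotin (List.mem_map.mpr ⟨cv, h1 ▸ h2, rfl⟩)
    rw [countP_congrB _ _ _ hsplitp, countP_or_disj _ _ _ hdisj,
      ih hkrest (fun p hp => hkl p (by simp [hp]))]
    have hhead : offs.countP (fun d => decide ((addL c d, true) = cv))
        = if cv.2 && decide (subL c cv.1 ∈ offs) then 1 else 0 := by
      by_cases hv : cv.2 = true
      · have hc2 : ∀ d ∈ offs, (decide ((addL c d, true) = cv)) = (d == subL cv.1 c) := by
          intro d hd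
          have hiff := addL_eq_iff c d cv.1 (hc.trans ((hol d hd)).symm)
          have hiff2 : ((addL c d, true) = cv) ↔ (d = subL cv.1 c) := by
            constructor
            · intro he
              exact (hiff.mp (Prod.ext_iff.mp he).1).2
            · intro he
              have h1 : addL c d = cv.1 := hiff.mpr ⟨by rw [hcv1, hc], he⟩
              exact Prod.ext_iff.mpr ⟨h1, hv.symm⟩
          rw [show (d == subL cv.1 c) = decide (d = subL cv.1 c) from by
            by_cases h : d = subL cv.1 c <;> simp [h]]
          exact decide_eq_decide.mpr hiff2
        rw [countP_congrB _ _ _ hc2, ← List.count_eq_countP, count_nodup _ _ hnd, hv]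
        have hsw := subL_mem_swap offs dim hneg cv.1 c hcv1 hc
        by_cases hmem : subL c cv.1 ∈ offs
        · rw [if_pos (hsw.mpr hmem)]
          simp [hmem]
        · rw [if_neg (fun hh => hmem (hsw.mp hh))]
          simp [hmem]
      · have hz : ∀ d ∈ offs, (decide ((addL c d, true) = cv)) = false := by
          intro d _
          simp only [decide_eq_false_iff_not]
          intro he
          exact hv ((Prod.ext_iff.mp he).2.symm)
        rw [countP_congrB _ _ _ hz]
        simp [hv]
    rw [hhead, List.countP_cons]
    omega

theorem nInt_eq_counter (cubes : List (List Int × Bool)) (offs : List (List Int)) (dim : Nat)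
    (hk : (cubes.map Prod.fst).Nodup) (hkl : ∀ p ∈ cubes, p.1.length = dim)
    (hnd : offs.Nodup) (hol : ∀ d ∈ offs, d.length = dim)
    (hneg : ∀ e ∈ offs, e.map (fun a => -a) ∈ offs)
    (c : List Int) (hc : c.length = dim) :
    nInt offs (PySem.Dict.mk cubes) c =
      (cubes.foldl (fun ctr cv =>
        if cv.2 then
          offs.foldl (fun ctr d =>
            ctr.insert (addL cv.1 d) (ctr.getD (addL cv.1 d) 0 + 1)) ctr
        else ctr) PySem.Dict.empty).getD c 0 := by
  rw [counter_getD, PySem.Dict.getD_empty]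
  have hmapc : ∀ cv ∈ cubes,
      (if cv.2 then (((offs.map (addL cv.1)).count c : Nat) : Int) else 0)
        = if (cv.2 && decide (subL c cv.1 ∈ offs)) then (1 : Int) else 0 := by
    intro cv hcv
    rw [count_map_addL offs dim cv.1 c hnd hol (hkl cv hcv)]
    by_cases hv : cv.2 = true <;> by_cases hm : subL c cv.1 ∈ offs <;>
      simp [hv, hm, hc]
  rw [List.map_congr_left hmapc, PySem.List.sum_map_ite_one_zero,
    ← dc_bridge cubes offs dim hk hkl hnd hol hneg c hc]
  simp [nInt]

-- ---------- structural lemmas ----------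

theorem contains_mk_iff (l : List (List Int × Bool)) (x : List Int) :
    (PySem.Dict.mk l).contains x = true ↔ x ∈ l.map Prod.fst := by
  simp [PySem.Dict.contains, List.any_eq_true]

theorem any_fst_eq (M l : List (List Int × Bool)) (x : List Int)
    (h : M.map Prod.fst = l.map Prod.fst) :
    (M.any fun p => p.1 == x) = (l.any fun p => p.1 == x) := by
  have key : ∀ (L : List (List Int × Bool)),
      (L.any fun p => p.1 == x) = ((L.map Prod.fst).any fun k => k == x) := by
    intro L
    rw [List.any_map]
    rfl
  rw [key, key, h]

theorem insert_middle (l1 l2 : List (List Int × Bool)) (k : List Int) (v b : Bool)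
    (h1 : k ∉ l1.map Prod.fst) (h2 : k ∉ l2.map Prod.fst) :
    (PySem.Dict.mk (l1 ++ (k, v) :: l2)).insert k b = PySem.Dict.mk (l1 ++ (k, b) :: l2) := by
  have hcont : (PySem.Dict.mk (l1 ++ (k, v) :: l2)).contains k = true := by
    simp [PySem.Dict.contains, List.any_append]
  simp only [PySem.Dict.insert, hcont, if_true]
  apply PySem.Dict.ext
  show List.map _ (l1 ++ (k, v) :: l2) = l1 ++ (k, b) :: l2
  rw [List.map_append, List.map_cons]
  have e1 : ∀ p ∈ l1, (if p.1 == k then (k, b) else p) = id p := by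
    intro p hp
    rw [if_neg, id]
    intro he
    exact h1 (List.mem_map.mpr ⟨p, hp, by simpa using he⟩)
  have e2 : ∀ p ∈ l2, (if p.1 == k then (k, b) else p) = id p := by
    intro p hp
    rw [if_neg, id]
    intro he
    exact h2 (List.mem_map.mpr ⟨p, hp, by simpa using he⟩)
  rw [List.map_congr_left e1, List.map_congr_left e2, List.map_id, List.map_id]
  simp

theorem fstep_eq_gstep_fold (offs : List (List Int)) (dc : PySem.Dict (List Int) Bool)
    (F : List (List Int × Bool)) (c : List Int) :
    fstep offs dc F c = (proxOf offs dc c).foldl gstep F := by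
  unfold fstep proxOf
  have hmap := List.foldl_map (f := addL c)
    (g := fun (F : List (List Int × Bool)) x =>
      if dc.contains x || (PySem.Dict.mk F).contains x then F else F ++ [(x, false)])
    (l := offs) (init := F)
  rw [← hmap]
  rw [PySem.List.foldl_congr_mem' _ _
    (fun acc x => if ¬ dc.contains x = true then gstep acc x else acc) _ ?_]
  · rw [PySem.List.foldl_ite_eq_foldl_filter]
    congr 1
    apply List.filter_congr
    intro x _
    by_cases h : dc.contains x = true <;> simp [h]
  · intro x _ acc
    by_cases h1 : dc.contains x = true
    · simp [h1]
    · simp only [Bool.not_eq_true] at h1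
      simp [gstep, h1]

theorem prox_fold (cubes : List (List Int × Bool)) (prox : List (List Int))
    (M F : List (List Int × Bool))
    (hMk : M.map Prod.fst = cubes.map Prod.fst)
    (hp : ∀ x ∈ prox, (PySem.Dict.mk cubes).contains x = false) :
    prox.foldl (fun cp x => if cp.contains x then cp else cp.insert x false)
        (PySem.Dict.mk (M ++ F))
      = PySem.Dict.mk (M ++ prox.foldl gstep F) := by
  induction prox generalizing F with
  | nil => simp
  | cons x t ih =>
    have hx : (cubes.any fun p => p.1 == x) = false := hp x (by simp)
    have hMany : (M.any fun p => p.1 == x) = false := by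
      rw [any_fst_eq M cubes x hMk]
      exact hx
    have hcont : (PySem.Dict.mk (M ++ F)).contains x = (PySem.Dict.mk F).contains x := by
      simp [PySem.Dict.contains, List.any_append, hMany]
    have hpt : ∀ y ∈ t, (PySem.Dict.mk cubes).contains y = false :=
      fun y hy => hp y (List.mem_cons_of_mem _ hy)
    simp only [List.foldl_cons]
    by_cases hF : (PySem.Dict.mk F).contains x = true
    · rw [if_pos (by rw [hcont]; exact hF), ih F hpt]
      simp only [gstep, if_pos hF]
    · have hF' : (PySem.Dict.mk F).contains x = false := by
        simp only [Bool.not_eq_true] at hF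
        exact hF
      rw [if_neg (by rw [hcont, hF']; simp)]
      have hins : (PySem.Dict.mk (M ++ F)).insert x false
          = PySem.Dict.mk (M ++ (F ++ [(x, false)])) := by
        simp only [PySem.Dict.insert, hcont, hF', Bool.false_eq_true, if_false]
        apply PySem.Dict.ext
        show (M ++ F) ++ [(x, false)] = M ++ (F ++ [(x, false)])
        simp
      rw [hins, ih (F ++ [(x, false)]) hpt]
      simp only [gstep, hF', Bool.false_eq_true, if_false]

theorem fstep_keys_sub (offs : List (List Int)) (cubes : List (List Int × Bool))
    (F : List (List Int × Bool)) (c : List Int)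
    (hF : ∀ k ∈ F.map Prod.fst, k ∉ cubes.map Prod.fst) :
    ∀ k ∈ (fstep offs (PySem.Dict.mk cubes) F c).map Prod.fst, k ∉ cubes.map Prod.fst := by
  unfold fstep
  induction offs generalizing F with
  | nil => exact hF
  | cons d t ih =>
    simp only [List.foldl_cons]
    by_cases hc : ((PySem.Dict.mk cubes).contains (addL c d)
        || (PySem.Dict.mk F).contains (addL c d)) = true
    · rw [if_pos hc]
      exact ih F hF
    · rw [if_neg hc]
      apply ih
      intro k hk
      rw [List.map_append, List.mem_append] at hk
      rcases hk with hk | hk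
      · exact hF k hk
      · simp only [List.map_cons, List.map_nil, List.mem_singleton] at hk
        subst hk
        intro hmem
        exact hc (by rw [Bool.or_eq_true]; exact Or.inl ((contains_mk_iff _ _).mpr hmem))

theorem A_main (offs : List (List Int)) (cubes : List (List Int × Bool))
    (an : List Int → Int × List (List Int))
    (hk : (cubes.map Prod.fst).Nodup)
    (han : ∀ c ∈ cubes.map Prod.fst,
      an c = (nInt offs (PySem.Dict.mk cubes) c, proxOf offs (PySem.Dict.mk cubes) c)) :
    ∀ (rest pre F : List (List Int × Bool)),
      cubes = pre ++ rest →
      (∀ k ∈ F.map Prod.fst, k ∉ cubes.map Prod.fst) →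
      (rest.map Prod.fst).foldl (stepMain (PySem.Dict.mk cubes) an)
          (PySem.Dict.mk (mapped offs (PySem.Dict.mk cubes) pre ++ rest ++ F))
        = PySem.Dict.mk (mapped offs (PySem.Dict.mk cubes) pre
            ++ mapped offs (PySem.Dict.mk cubes) rest
            ++ front offs (PySem.Dict.mk cubes) rest F) := by
  intro rest
  induction rest with
  | nil =>
    intro pre F hsplit hF
    simp [mapped, front]
  | cons cv rest' ih =>
    intro pre F hsplit hF
    have hcvmem : cv ∈ cubes := by rw [hsplit]; simp
    have hkeymem : cv.1 ∈ cubes.map Prod.fst := List.mem_map.mpr ⟨cv, hcvmem, rfl⟩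
    have hgetD : (PySem.Dict.mk cubes).getD cv.1 false = cv.2 :=
      PySem.Dict.getD_of_mem_items (PySem.Dict.mk cubes) (k := cv.1) (v := cv.2)
        (by simpa using hcvmem) hk false
    have hannn := han cv.1 hkeymem
    have hnodup' : (pre.map Prod.fst ++ cv.1 :: rest'.map Prod.fst).Nodup := by
      have h0 : ((pre ++ cv :: rest').map Prod.fst).Nodup := hsplit ▸ hk
      simpa [List.map_append] using h0
    obtain ⟨np1, np2, hdisj⟩ := List.nodup_append.mp hnodup'
    have hpre : cv.1 ∉ pre.map Prod.fst := fun hmm =>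
      hdisj cv.1 hmm cv.1 (by simp) rfl
    have hrest : cv.1 ∉ rest'.map Prod.fst := by
      rw [List.nodup_cons] at np2
      exact np2.1
    have hFk : cv.1 ∉ F.map Prod.fst := fun hmm => hF cv.1 hmm hkeymem
    have hmfst : (mapped offs (PySem.Dict.mk cubes) pre).map Prod.fst = pre.map Prod.fst := by
      simp [mapped]
    have hnotl2 : cv.1 ∉ (rest' ++ F).map Prod.fst := by
      rw [List.map_append, List.mem_append]
      rintro (h | h)
      · exact hrest h
      · exact hFk h
    simp only [List.map_cons, List.foldl_cons]
    have hstep : stepMain (PySem.Dict.mk cubes) an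
        (PySem.Dict.mk (mapped offs (PySem.Dict.mk cubes) pre ++ (cv :: rest') ++ F)) cv.1
        = PySem.Dict.mk ((mapped offs (PySem.Dict.mk cubes) pre
            ++ (cv.1, newVal offs (PySem.Dict.mk cubes) cv) :: rest')
            ++ fstep offs (PySem.Dict.mk cubes) F cv.1) := by
      unfold stepMain
      rw [hannn]
      simp only [hgetD]
      have hassoc : mapped offs (PySem.Dict.mk cubes) pre ++ (cv :: rest') ++ F
          = mapped offs (PySem.Dict.mk cubes) pre ++ (cv.1, cv.2) :: (rest' ++ F) := by
        simp
      rw [hassoc]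
      have hmid : (if cv.2 = true ∧ ¬(nInt offs (PySem.Dict.mk cubes) cv.1 = 2
              ∨ nInt offs (PySem.Dict.mk cubes) cv.1 = 3) then
            (PySem.Dict.mk (mapped offs (PySem.Dict.mk cubes) pre
              ++ (cv.1, cv.2) :: (rest' ++ F))).insert cv.1 false
          else if ¬(cv.2 = true) ∧ nInt offs (PySem.Dict.mk cubes) cv.1 = 3 then
            (PySem.Dict.mk (mapped offs (PySem.Dict.mk cubes) pre
              ++ (cv.1, cv.2) :: (rest' ++ F))).insert cv.1 true
          else PySem.Dict.mk (mapped offs (PySem.Dict.mk cubes) pre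
              ++ (cv.1, cv.2) :: (rest' ++ F)))
          = PySem.Dict.mk (mapped offs (PySem.Dict.mk cubes) pre
              ++ (cv.1, newVal offs (PySem.Dict.mk cubes) cv) :: (rest' ++ F)) := by
        by_cases hv : cv.2 = true
        · by_cases h23 : nInt offs (PySem.Dict.mk cubes) cv.1 = 2
              ∨ nInt offs (PySem.Dict.mk cubes) cv.1 = 3
          · rw [if_neg (by tauto), if_neg (by tauto)]
            have : newVal offs (PySem.Dict.mk cubes) cv = cv.2 := by
              simp [newVal, hv, h23]
            rw [this]
          · rw [if_pos ⟨hv, h23⟩,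
              insert_middle _ _ _ _ _ (by rw [hmfst]; exact hpre) hnotl2]
            have : newVal offs (PySem.Dict.mk cubes) cv = false := by
              simp [newVal, hv, h23]
            rw [this]
        · by_cases h3 : nInt offs (PySem.Dict.mk cubes) cv.1 = 3
          · rw [if_neg (by tauto), if_pos ⟨hv, h3⟩,
              insert_middle _ _ _ _ _ (by rw [hmfst]; exact hpre) hnotl2]
            have : newVal offs (PySem.Dict.mk cubes) cv = true := by
              simp [newVal, hv, h3]
            rw [this]
          · rw [if_neg (by tauto), if_neg (by tauto)]
            have : newVal offs (PySem.Dict.mk cubes) cv = cv.2 := by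
              simp [newVal, hv, h3]
            rw [this]
      rw [hmid]
      have hassoc2 : mapped offs (PySem.Dict.mk cubes) pre
          ++ (cv.1, newVal offs (PySem.Dict.mk cubes) cv) :: (rest' ++ F)
          = (mapped offs (PySem.Dict.mk cubes) pre
              ++ (cv.1, newVal offs (PySem.Dict.mk cubes) cv) :: rest') ++ F := by
        simp
      rw [hassoc2]
      rw [prox_fold cubes _ _ _ (by simp [mapped, hsplit]) (by
        intro x hx
        rw [proxOf, List.mem_filter] at hx
        simpa using hx.2)]
      rw [← fstep_eq_gstep_fold]
    rw [hstep]
    have hF' := fstep_keys_sub offs cubes F cv.1 hF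
    have hih := ih (pre ++ [cv]) (fstep offs (PySem.Dict.mk cubes) F cv.1)
      (by rw [hsplit]; simp) hF'
    have hstate : (mapped offs (PySem.Dict.mk cubes) pre
          ++ (cv.1, newVal offs (PySem.Dict.mk cubes) cv) :: rest')
          ++ fstep offs (PySem.Dict.mk cubes) F cv.1
        = mapped offs (PySem.Dict.mk cubes) (pre ++ [cv]) ++ rest'
          ++ fstep offs (PySem.Dict.mk cubes) F cv.1 := by
      simp [mapped]
    rw [hstate, hih]
    have : front offs (PySem.Dict.mk cubes) (cv :: rest') F
        = front offs (PySem.Dict.mk cubes) rest' (fstep offs (PySem.Dict.mk cubes) F cv.1) := by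
      simp [front]
    rw [this]
    apply congrArg
    simp [mapped]

theorem B_front (offs : List (List Int)) (cubes : List (List Int × Bool)) :
    ∀ (l M F : List (List Int × Bool)),
      M.map Prod.fst = cubes.map Prod.fst →
      l.foldl (fun out cv =>
          offs.foldl (fun out d =>
            if (PySem.Dict.mk cubes).contains (addL cv.1 d) then out
            else if out.contains (addL cv.1 d) then out
            else out.insert (addL cv.1 d) false) out)
        (PySem.Dict.mk (M ++ F))
      = PySem.Dict.mk (M ++ front offs (PySem.Dict.mk cubes) l F) := by
  intro l
  induction l with
  | nil =>
    intro M F hM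
    simp [front]
  | cons cv t ih =>
    intro M F hM
    simp only [List.foldl_cons]
    have hinner : ∀ (os : List (List Int)) (F : List (List Int × Bool)),
        os.foldl (fun out d =>
            if (PySem.Dict.mk cubes).contains (addL cv.1 d) then out
            else if out.contains (addL cv.1 d) then out
            else out.insert (addL cv.1 d) false) (PySem.Dict.mk (M ++ F))
          = PySem.Dict.mk (M ++ os.foldl (fun F d =>
              if (PySem.Dict.mk cubes).contains (addL cv.1 d)
                  || (PySem.Dict.mk F).contains (addL cv.1 d) then F
              else F ++ [(addL cv.1 d, false)]) F) := by
      intro os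
      induction os with
      | nil => intro F; rfl
      | cons d t2 ih2 =>
        intro F
        simp only [List.foldl_cons]
        by_cases h1 : (PySem.Dict.mk cubes).contains (addL cv.1 d) = true
        · rw [if_pos h1, if_pos (by rw [Bool.or_eq_true]; exact Or.inl h1), ih2 F]
        · have h1' : (PySem.Dict.mk cubes).contains (addL cv.1 d) = false := by
            simp only [Bool.not_eq_true] at h1
            exact h1
          have hMany : (M.any fun p => p.1 == addL cv.1 d) = false := by
            rw [any_fst_eq M cubes _ hM]
            exact h1'
          have hcont : (PySem.Dict.mk (M ++ F)).contains (addL cv.1 d)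
              = (PySem.Dict.mk F).contains (addL cv.1 d) := by
            simp [PySem.Dict.contains, List.any_append, hMany]
          by_cases h2 : (PySem.Dict.mk F).contains (addL cv.1 d) = true
          · rw [if_neg (by rw [h1']; simp), if_pos (by rw [hcont]; exact h2),
              if_pos (by rw [Bool.or_eq_true]; exact Or.inr h2), ih2 F]
          · have h2' : (PySem.Dict.mk F).contains (addL cv.1 d) = false := by
              simp only [Bool.not_eq_true] at h2
              exact h2
            rw [if_neg (by rw [h1']; simp), if_neg (by rw [hcont, h2']; simp),
              if_neg (by rw [h1', h2']; simp)]
            have hins : (PySem.Dict.mk (M ++ F)).insert (addL cv.1 d) false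
                = PySem.Dict.mk (M ++ (F ++ [(addL cv.1 d, false)])) := by
              simp only [PySem.Dict.insert, hcont, h2', Bool.false_eq_true, if_false]
              apply PySem.Dict.ext
              show (M ++ F) ++ [(addL cv.1 d, false)] = M ++ (F ++ [(addL cv.1 d, false)])
              simp
            rw [hins, ih2 (F ++ [(addL cv.1 d, false)])]
    rw [hinner offs F]
    exact ih M (fstep offs (PySem.Dict.mk cubes) F cv.1) hM

-- ===== VERDICT (by name: the statement is the Claim_ definition above) =====
theorem next_cubes_spec : Claim_equal_next_cubes := by
  unfold Claim_equal_next_cubes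
  intro cubes part2 _ hpre
  obtain ⟨hk, hkl⟩ := hpre
  unfold Spec_next_cubes
  cases part2 with
  | false =>
    have hdim : ∀ p ∈ cubes, p.1.length = 3 := by simpa using hkl
    have han : ∀ c ∈ cubes.map Prod.fst,
        (fun c => if !false then active_neighbours_1 (PySem.Dict.mk cubes) c
            else active_neighbours_2 (PySem.Dict.mk cubes) c) c
          = (nInt (offsB 3) (PySem.Dict.mk cubes) c,
             proxOf (offsB 3) (PySem.Dict.mk cubes) c) := by
      intro c hc
      obtain ⟨p, hp, rfl⟩ := List.mem_map.mp hc
      obtain ⟨x, y, z, he⟩ := length_eq_three _ (hdim p hp)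
      rw [he]
      simpa using an1_closed (PySem.Dict.mk cubes) x y z
    have hA := A_main (offsB 3) cubes _ hk han cubes [] [] (by simp) (by simp)
    have hinit : PySem.Dict.mk (mapped (offsB 3) (PySem.Dict.mk cubes) [] ++ cubes ++ [])
        = PySem.Dict.mk cubes := by
      simp [mapped]
    rw [hinit] at hA
    have hAres : next_cubes cubes false
        = mapped (offsB 3) (PySem.Dict.mk cubes) cubes
          ++ front (offsB 3) (PySem.Dict.mk cubes) cubes [] := by
      show ((cubes.map Prod.fst).foldl
          (stepMain (PySem.Dict.mk cubes)
            (fun c => if !false then active_neighbours_1 (PySem.Dict.mk cubes) c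
              else active_neighbours_2 (PySem.Dict.mk cubes) c))
          (PySem.Dict.mk cubes)).items = _
      rw [hA]
      simp [mapped]
    have hmapeq : (cubes.map fun cv =>
          (cv.1, if cv.2 then
            decide ((counterOf (offsB 3) cubes).getD cv.1 0 = 2
              ∨ (counterOf (offsB 3) cubes).getD cv.1 0 = 3)
           else decide ((counterOf (offsB 3) cubes).getD cv.1 0 = 3)))
        = mapped (offsB 3) (PySem.Dict.mk cubes) cubes := by
      apply List.map_congr_left
      intro cv hcv
      have hcnt := nInt_eq_counter cubes (offsB 3) 3 hk hdim offsB3_nodup offsB3_len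
        offsB3_neg cv.1 (hdim cv hcv)
      rw [show (counterOf (offsB 3) cubes) = cubes.foldl (fun ctr cv =>
          if cv.2 then
            (offsB 3).foldl (fun ctr d =>
              ctr.insert (addL cv.1 d) (ctr.getD (addL cv.1 d) 0 + 1)) ctr
          else ctr) PySem.Dict.empty from rfl, ← hcnt]
      rfl
    have hBres : next_cubes_alt cubes false
        = mapped (offsB 3) (PySem.Dict.mk cubes) cubes
          ++ front (offsB 3) (PySem.Dict.mk cubes) cubes [] := by
      show (cubes.foldl (fun out cv =>
          (offsB 3).foldl (fun out d =>
            if (PySem.Dict.mk cubes).contains (addL cv.1 d) then out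
            else if out.contains (addL cv.1 d) then out
            else out.insert (addL cv.1 d) false) out)
          (PySem.Dict.mk (cubes.map fun cv =>
            (cv.1, if cv.2 then
              decide ((counterOf (offsB 3) cubes).getD cv.1 0 = 2
                ∨ (counterOf (offsB 3) cubes).getD cv.1 0 = 3)
             else decide ((counterOf (offsB 3) cubes).getD cv.1 0 = 3))))).items = _
      rw [hmapeq]
      have hbf := B_front (offsB 3) cubes cubes
        (mapped (offsB 3) (PySem.Dict.mk cubes) cubes) [] (by simp [mapped])
      rw [show PySem.Dict.mk (mapped (offsB 3) (PySem.Dict.mk cubes) cubes)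
          = PySem.Dict.mk (mapped (offsB 3) (PySem.Dict.mk cubes) cubes ++ []) from by simp,
        hbf]
    rw [hAres, hBres]
  | true =>
    have hdim : ∀ p ∈ cubes, p.1.length = 4 := by simpa using hkl
    have han : ∀ c ∈ cubes.map Prod.fst,
        (fun c => if !true then active_neighbours_1 (PySem.Dict.mk cubes) c
            else active_neighbours_2 (PySem.Dict.mk cubes) c) c
          = (nInt (offsB 4) (PySem.Dict.mk cubes) c,
             proxOf (offsB 4) (PySem.Dict.mk cubes) c) := by
      intro c hc
      obtain ⟨p, hp, rfl⟩ := List.mem_map.mp hc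
      obtain ⟨x, y, z, w, he⟩ := length_eq_four _ (hdim p hp)
      rw [he]
      simpa using an2_closed (PySem.Dict.mk cubes) x y z w
    have hA := A_main (offsB 4) cubes _ hk han cubes [] [] (by simp) (by simp)
    have hinit : PySem.Dict.mk (mapped (offsB 4) (PySem.Dict.mk cubes) [] ++ cubes ++ [])
        = PySem.Dict.mk cubes := by
      simp [mapped]
    rw [hinit] at hA
    have hAres : next_cubes cubes true
        = mapped (offsB 4) (PySem.Dict.mk cubes) cubes
          ++ front (offsB 4) (PySem.Dict.mk cubes) cubes [] := by
      show ((cubes.map Prod.fst).foldl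
          (stepMain (PySem.Dict.mk cubes)
            (fun c => if !true then active_neighbours_1 (PySem.Dict.mk cubes) c
              else active_neighbours_2 (PySem.Dict.mk cubes) c))
          (PySem.Dict.mk cubes)).items = _
      rw [hA]
      simp [mapped]
    have hmapeq : (cubes.map fun cv =>
          (cv.1, if cv.2 then
            decide ((counterOf (offsB 4) cubes).getD cv.1 0 = 2
              ∨ (counterOf (offsB 4) cubes).getD cv.1 0 = 3)
           else decide ((counterOf (offsB 4) cubes).getD cv.1 0 = 3)))
        = mapped (offsB 4) (PySem.Dict.mk cubes) cubes := by
      apply List.map_congr_left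
      intro cv hcv
      have hcnt := nInt_eq_counter cubes (offsB 4) 4 hk hdim offsB4_nodup offsB4_len
        offsB4_neg cv.1 (hdim cv hcv)
      rw [show (counterOf (offsB 4) cubes) = cubes.foldl (fun ctr cv =>
          if cv.2 then
            (offsB 4).foldl (fun ctr d =>
              ctr.insert (addL cv.1 d) (ctr.getD (addL cv.1 d) 0 + 1)) ctr
          else ctr) PySem.Dict.empty from rfl, ← hcnt]
      rfl
    have hBres : next_cubes_alt cubes true
        = mapped (offsB 4) (PySem.Dict.mk cubes) cubes
          ++ front (offsB 4) (PySem.Dict.mk cubes) cubes [] := by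
      show (cubes.foldl (fun out cv =>
          (offsB 4).foldl (fun out d =>
            if (PySem.Dict.mk cubes).contains (addL cv.1 d) then out
            else if out.contains (addL cv.1 d) then out
            else out.insert (addL cv.1 d) false) out)
          (PySem.Dict.mk (cubes.map fun cv =>
            (cv.1, if cv.2 then
              decide ((counterOf (offsB 4) cubes).getD cv.1 0 = 2
                ∨ (counterOf (offsB 4) cubes).getD cv.1 0 = 3)
             else decide ((counterOf (offsB 4) cubes).getD cv.1 0 = 3))))).items = _
      rw [hmapeq]
      have hbf := B_front (offsB 4) cubes cubes
        (mapped (offsB 4) (PySem.Dict.mk cubes) cubes) [] (by simp [mapped])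
      rw [show PySem.Dict.mk (mapped (offsB 4) (PySem.Dict.mk cubes) cubes)
          = PySem.Dict.mk (mapped (offsB 4) (PySem.Dict.mk cubes) cubes ++ []) from by simp,
        hbf]
    rw [hAres, hBres]
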